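-- pv_equiv track=rewrite | github.com/silnrsi/graide | lib/graide/glyph.py | sortedCollKeys
-- ===== SOURCE A (Python) =====
-- def sortedCollKeys(keys) :
--     goodOrder = ["flags", "min.x", "max.x", "min.y", "max.y", "margin", "marginweight", \
--         "exclude.glyph", "exclude.offset.x", "exclude.offset.y", "complexFit"]
--     result = list()
--     for k in goodOrder :  # add items above in that order
--         if k in keys :
--             result.append(k)
--     for k in keys :       # add anything else
--         if not k in result :
--             result.append(k)
--     return result
-- ===== SOURCE B (Python) =====
-- def sortedCollKeys(keys):
--     goodOrder = ["flags", "min.x", "max.x", "min.y", "max.y", "margin", "marginweight",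
--         "exclude.glyph", "exclude.offset.x", "exclude.offset.y", "complexFit"]
--     priority = {k: i for i, k in enumerate(goodOrder)}
--     uniq = list(dict.fromkeys(keys))
--     return sorted(uniq, key=lambda k: priority.get(k, len(goodOrder)))
-- ===== Notes on version B (the rewrite author's own statement) =====
-- stated objective: faster
-- what changed: Replaces A's accumulation loops with O(n) list membership scans by building a priority table from goodOrder, deduplicating the keys via dict.fromkeys (hash-based), and stably sorting them by priority (unknown keys get priority len(goodOrder), keeping their original relative order).
import Mathlib
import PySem

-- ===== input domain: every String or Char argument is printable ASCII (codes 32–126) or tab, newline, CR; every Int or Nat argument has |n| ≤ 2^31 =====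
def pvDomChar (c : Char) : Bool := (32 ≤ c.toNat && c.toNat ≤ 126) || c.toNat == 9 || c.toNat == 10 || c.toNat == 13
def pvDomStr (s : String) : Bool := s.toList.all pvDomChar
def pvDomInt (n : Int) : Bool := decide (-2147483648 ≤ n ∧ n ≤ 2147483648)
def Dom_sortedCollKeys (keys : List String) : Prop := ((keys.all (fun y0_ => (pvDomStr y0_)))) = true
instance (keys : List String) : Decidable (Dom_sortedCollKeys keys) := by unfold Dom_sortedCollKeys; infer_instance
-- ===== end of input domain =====

-- B replaces A's two membership-scanning accumulation loops by a priority table plus a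
-- stable sort of the deduplicated keys (objective: faster; a timing run measured B faster).

-- the module's fixed key order (the `goodOrder` local list of both Pythons)
def pvGoodOrder : List String :=
  ["flags", "min.x", "max.x", "min.y", "max.y", "margin", "marginweight",
   "exclude.glyph", "exclude.offset.x", "exclude.offset.y", "complexFit"]

-- ===== PORT A =====
def sortedCollKeys (keys : List String) : List String :=
  let result1 := pvGoodOrder.foldl
    (fun result k => if k ∈ keys then result ++ [k] else result) []
  keys.foldl (fun result k => if ¬ (k ∈ result) then result ++ [k] else result) result1

-- ===== PORT B =====
-- priority = {k: i for i, k in enumerate(goodOrder)}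
def pvPriority : PySem.Dict String Int :=
  (PySem.List.enumerate pvGoodOrder).foldl (fun d p => d.insert p.2 p.1) PySem.Dict.empty

-- the sort key: lambda k: priority.get(k, len(goodOrder))
def pvKey (k : String) : Int := pvPriority.getD k (pvGoodOrder.length : Int)

def sortedCollKeys_alt (keys : List String) : List String :=
  let uniq := PySem.List.dedup keys
  PySem.List.sorted uniq pvKey

-- ===== PRECONDITION & SPEC =====
def Spec_sortedCollKeys (keys : List String) (out : List String) : Prop := out = sortedCollKeys_alt keys
instance (keys : List String) (out : List String) : Decidable (Spec_sortedCollKeys keys out) := by unfold Spec_sortedCollKeys; infer_instance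

-- ===== CLAIM (what is proved, stated in full; the proofs are below) =====
def Claim_equal_sortedCollKeys : Prop := ∀ (keys : List String), Dom_sortedCollKeys keys → Spec_sortedCollKeys keys (sortedCollKeys keys)

-- ===== LEMMAS AND PROOFS =====

-- the common canonical value both ports compute: the goodOrder keys that occur, then the
-- remaining keys deduplicated in first-occurrence order
def pvCanon (l : List String) : List String :=
  pvGoodOrder.filter (fun z => decide (z ∈ l)) ++ l.filter (fun k => decide (k ∉ pvGoodOrder))

lemma pvKey_lt_of_mem (z : String) (h : z ∈ pvGoodOrder) : pvKey z < 11 := by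
  fin_cases h <;> decide

lemma pvKey_of_not_mem (y : String) (h : y ∉ pvGoodOrder) : pvKey y = 11 := by
  have hP : pvPriority =
      ((((((((((PySem.Dict.empty.insert "flags" 0).insert "min.x" 1).insert "max.x" 2).insert
        "min.y" 3).insert "max.y" 4).insert "margin" 5).insert "marginweight" 6).insert
        "exclude.glyph" 7).insert "exclude.offset.x" 8).insert "exclude.offset.y" 9).insert
        "complexFit" 10 := rfl
  simp only [pvGoodOrder, List.mem_cons, not_or, List.not_mem_nil] at h
  obtain ⟨h1, h2, h3, h4, h5, h6, h7, h8, h9, h10, h11, -⟩ := h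
  simp [pvKey, hP, PySem.Dict.getD_insert, PySem.Dict.getD_empty,
    h1, h2, h3, h4, h5, h6, h7, h8, h9, h10, h11, pvGoodOrder]

lemma pvKey_mono : (pvGoodOrder.map pvKey).Pairwise (· < ·) := by decide

lemma insertBy_cons (bf : String → String → Bool) (x y : String) (ys : List String) :
    PySem.List.insertBy bf x (y :: ys) =
      if bf x y then x :: y :: ys else y :: PySem.List.insertBy bf x ys := rfl

lemma insertBy_front (bf : String → String → Bool) (x : String) (L : List String)
    (h : ∀ y ∈ L, bf x y = true) : PySem.List.insertBy bf x L = x :: L := by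
  cases L with
  | nil => rfl
  | cons y ys => rw [insertBy_cons, if_pos (h y (by simp))]

-- inserting an element of pvGoodOrder lands at its pvGoodOrder position
lemma ins_aux (p B : List String) (x : String) :
    ∀ (g : List String), (g.map pvKey).Pairwise (· < ·) → x ∈ g → x ∉ p →
    (∀ b ∈ B, pvKey x < pvKey b) →
    PySem.List.insertBy (fun a b => decide (pvKey a < pvKey b)) x
        (g.filter (fun z => decide (z ∈ p)) ++ B)
      = g.filter (fun z => decide (z ∈ p ++ [x])) ++ B := by
  intro g
  induction g with
  | nil => simp
  | cons a g' ih =>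
    intro hpw hxg hxp hB
    rw [List.map_cons, List.pairwise_cons] at hpw
    obtain ⟨ha, hpw'⟩ := hpw
    have hkey_lt : ∀ z ∈ g', pvKey a < pvKey z := by
      intro z hz; exact ha _ (List.mem_map_of_mem hz)
    by_cases hax : a = x
    · subst hax
      have hxg' : ∀ z ∈ g', z ≠ a := by
        intro z hz h; exact absurd (h ▸ hkey_lt z hz) (lt_irrefl _)
      rw [List.filter_cons, if_neg (by simpa using hxp),
          List.filter_cons, if_pos (by simp)]
      rw [insertBy_front]
      · congr 2
        apply List.filter_congr
        intro z hz
        have hne := hxg' z hz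
        simp [hne]
      · intro y hy
        simp only [List.mem_append, List.mem_filter] at hy
        rcases hy with ⟨hy, -⟩ | hy
        · simpa using hkey_lt y hy
        · simpa using hB y hy
    · have hxg'' : x ∈ g' := by
        rcases List.mem_cons.mp hxg with h | h
        · exact absurd h.symm hax
        · exact h
      by_cases hap : a ∈ p
      · rw [List.filter_cons, if_pos (by simpa using hap), List.cons_append,
            insertBy_cons, if_neg (by simp; exact le_of_lt (hkey_lt x hxg'')),
            List.filter_cons, if_pos (by simp [hap])]
        rw [ih hpw' hxg'' hxp hB, List.cons_append]
      · rw [List.filter_cons, if_neg (by simpa using hap),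
            List.filter_cons, if_neg (by simp [hap, hax])]
        exact ih hpw' hxg'' hxp hB

-- one insertion step preserves the canonical form
lemma insert_canon (p : List String) (x : String) (hx : x ∉ p) :
    PySem.List.insertBy (fun a b => decide (pvKey a < pvKey b)) x (pvCanon p)
      = pvCanon (p ++ [x]) := by
  by_cases hxg : x ∈ pvGoodOrder
  · have hB : ∀ b ∈ p.filter (fun k => decide (k ∉ pvGoodOrder)), pvKey x < pvKey b := by
      intro b hb
      simp only [List.mem_filter, decide_eq_true_eq] at hb
      rw [pvKey_of_not_mem b hb.2]
      exact pvKey_lt_of_mem x hxg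
    unfold pvCanon
    rw [ins_aux p _ x pvGoodOrder pvKey_mono hxg hx hB, List.filter_append]
    simp [hxg]
  · have hfalse : ∀ y ∈ pvCanon p, decide (pvKey x < pvKey y) = false := by
      intro y hy
      rw [pvKey_of_not_mem x hxg]
      simp only [pvCanon, List.mem_append, List.mem_filter, decide_eq_true_eq] at hy
      rcases hy with ⟨hy, -⟩ | ⟨-, hy⟩
      · simp [not_lt.mpr (le_of_lt (pvKey_lt_of_mem y hy))]
      · simp [pvKey_of_not_mem y hy]
    rw [PySem.List.insertBy_of_forall_not_before _ _ _ hfalse]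
    unfold pvCanon
    rw [List.filter_append, List.append_assoc]
    congr 1
    · apply List.filter_congr
      intro z hz
      have hne : z ≠ x := fun h => hxg (h ▸ hz)
      simp [hne]
    · simp [hxg]

-- B's stable insertion sort computes the canonical form of any duplicate-free list
lemma sorted_canon (l : List String) (h : l.Nodup) :
    PySem.List.sorted l pvKey = pvCanon l := by
  induction l using List.reverseRecOn with
  | nil => simp [pvCanon, PySem.List.sorted]
  | append_singleton p x ih =>
    have hx : x ∉ p := by
      rcases List.nodup_append.mp h with ⟨-, -, hd⟩
      intro hxp
      exact (hd x hxp x (by simp)) rfl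
    have hp : p.Nodup := (List.nodup_append.mp h).1
    rw [PySem.List.sorted_eq_foldl_insertBy, List.foldl_append, List.foldl_cons, List.foldl_nil,
      ← PySem.List.sorted_eq_foldl_insertBy, ih hp, insert_canon p x hx]

-- A's second loop never touches the goodOrder prefix; the extras accumulate separately
lemma loop2 (ks : List String) (r : List String)
    (h : ∀ k ∈ ks, k ∈ pvGoodOrder → k ∈ r) (hr : ∀ z ∈ r, z ∈ pvGoodOrder) :
    ∀ (e : List String), (∀ z ∈ e, z ∉ pvGoodOrder) →
    ks.foldl (fun result k => if ¬ (k ∈ result) then result ++ [k] else result) (r ++ e)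
      = r ++ ks.foldl (fun e k => if k ∈ pvGoodOrder ∨ k ∈ e then e else e ++ [k]) e := by
  induction ks with
  | nil => intro e _; simp
  | cons k ks' ih =>
    intro e he
    have h' : ∀ k' ∈ ks', k' ∈ pvGoodOrder → k' ∈ r := fun k' hk' => h k' (by simp [hk'])
    rw [List.foldl_cons, List.foldl_cons]
    by_cases hg : k ∈ pvGoodOrder
    · rw [if_neg (not_not_intro (List.mem_append.mpr (Or.inl (h k (by simp) hg)))),
          if_pos (Or.inl hg)]
      exact ih h' e he
    · by_cases he' : k ∈ e
      · rw [if_neg (not_not_intro (List.mem_append.mpr (Or.inr he'))), if_pos (Or.inr he')]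
        exact ih h' e he
      · have hkr : k ∉ r := fun hkr => hg (hr k hkr)
        rw [if_pos (by simp [hkr, he']), if_neg (by simp [hg, he']), List.append_assoc]
        exact ih h' (e ++ [k]) (by
          intro z hz
          rcases List.mem_append.mp hz with hz | hz
          · exact he z hz
          · simpa [List.mem_singleton.mp hz] using hg)

-- A's extras loop computes the non-goodOrder part of the ordered dedup
lemma extras_eq (ks : List String) : ∀ (s : List String),
    (List.foldl PySem.Set.add s ks).filter (fun k => decide (k ∉ pvGoodOrder))
      = ks.foldl (fun e k => if k ∈ pvGoodOrder ∨ k ∈ e then e else e ++ [k])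
          (s.filter (fun k => decide (k ∉ pvGoodOrder))) := by
  induction ks with
  | nil => intro s; simp
  | cons k ks' ih =>
    intro s
    rw [List.foldl_cons, List.foldl_cons]
    by_cases hk : k ∈ s
    · rw [show PySem.Set.add s k = s by simp [PySem.Set.add, hk]]
      rw [ih s, if_pos ?_]
      by_cases hg : k ∈ pvGoodOrder
      · exact Or.inl hg
      · exact Or.inr (List.mem_filter.mpr ⟨hk, by simp [hg]⟩)
    · rw [show PySem.Set.add s k = s ++ [k] by simp [PySem.Set.add, hk]]
      by_cases hg : k ∈ pvGoodOrder
      · rw [ih (s ++ [k]), if_pos (Or.inl hg), List.filter_append,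
          show List.filter (fun k => decide (k ∉ pvGoodOrder)) [k] = [] by simp [hg],
          List.append_nil]
      · rw [ih (s ++ [k]), if_neg ?_, List.filter_append]
        · simp [hg]
        · rintro (h | h)
          · exact hg h
          · exact hk (List.mem_filter.mp h).1

-- ===== VERDICT (by name: the statement is the Claim_ definition above) =====
theorem sortedCollKeys_spec : Claim_equal_sortedCollKeys := by
  intro keys _
  unfold Spec_sortedCollKeys
  have h1 : (pvGoodOrder.foldl (fun result k => if k ∈ keys then result ++ [k] else result) [])
      = pvGoodOrder.filter (fun k => decide (k ∈ keys)) := by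
    have := PySem.List.foldl_append_if (fun k => decide (k ∈ keys)) id pvGoodOrder []
    simpa using this
  show (keys.foldl (fun result k => if ¬ (k ∈ result) then result ++ [k] else result)
      (pvGoodOrder.foldl (fun result k => if k ∈ keys then result ++ [k] else result) [])) = _
  rw [h1]
  set r0 := pvGoodOrder.filter (fun k => decide (k ∈ keys)) with hr0
  rw [show r0 = r0 ++ [] from (List.append_nil r0).symm]
  rw [loop2 keys r0 (fun k hk hg => List.mem_filter.mpr ⟨hg, by simp [hk]⟩)
      (fun z hz => (List.mem_filter.mp hz).1) [] (by simp)]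
  show _ = PySem.List.sorted (PySem.List.dedup keys) pvKey
  rw [sorted_canon _ (PySem.List.nodup_dedup keys)]
  unfold pvCanon
  congr 1
  · rw [hr0]
    apply List.filter_congr
    intro z hz
    simp
  · have := extras_eq keys []
    simp only [List.filter_nil] at this
    rw [← this]
    rfl
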